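-- pv_equiv track=rewrite | github.com/Luke-Poeppel/decitala | decitala/pofp.py | get_filtered_break_points
-- ===== SOURCE A (Python) =====
-- import copy
--
-- def get_filtered_break_points(break_points):
-- 	filtered_break_points = copy.copy(break_points)
-- 	i = 0
-- 	partition_start = 0
-- 	while i < len(filtered_break_points):
-- 		if 9 <= filtered_break_points[i] - partition_start <= 19:
-- 			partition_start = filtered_break_points[i]
-- 			i += 1
-- 		else:
-- 			del filtered_break_points[i]
--
-- 	return filtered_break_points
-- ===== SOURCE B (Python) =====
-- def get_filtered_break_points(break_points):
--     kept = []
--     partition_start = 0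
--     for bp in break_points:
--         if 9 <= bp - partition_start <= 19:
--             kept.append(bp)
--             partition_start = bp
--     return kept
-- ===== Notes on version B (the rewrite author's own statement) =====
-- stated objective: faster
-- what changed: Replaces the index-based while loop that mutates the list with del (quadratic shifting) by a single forward pass that appends the kept break points to a fresh list.
import Mathlib
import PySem

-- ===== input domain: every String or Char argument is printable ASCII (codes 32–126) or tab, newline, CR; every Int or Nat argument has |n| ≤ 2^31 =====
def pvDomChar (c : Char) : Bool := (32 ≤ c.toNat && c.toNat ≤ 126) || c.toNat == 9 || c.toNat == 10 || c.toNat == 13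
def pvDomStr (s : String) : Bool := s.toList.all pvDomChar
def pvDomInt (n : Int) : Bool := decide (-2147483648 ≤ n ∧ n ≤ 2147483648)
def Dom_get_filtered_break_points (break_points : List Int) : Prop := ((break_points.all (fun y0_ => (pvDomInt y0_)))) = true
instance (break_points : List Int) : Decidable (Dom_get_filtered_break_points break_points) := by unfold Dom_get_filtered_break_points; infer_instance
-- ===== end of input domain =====

-- B replaces A's in-place deletion loop (quadratic element shifting) by one forward pass
-- appending kept break points to a fresh list: same return value, O(n) instead of O(n^2).

-- ===== PORT A =====
-- A's while loop: index i over the mutated copy, deleting the current element when it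
-- does not lie 9..19 beyond partition_start. Terminates since length - i drops each step.
def getFBPLoopA (fbp : List Int) (i : Nat) (partition_start : Int) : List Int :=
  if h : i < fbp.length then
    if 9 ≤ fbp[i] - partition_start ∧ fbp[i] - partition_start ≤ 19 then
      getFBPLoopA fbp (i + 1) fbp[i]
    else
      getFBPLoopA (fbp.eraseIdx i) i partition_start
  else fbp
termination_by fbp.length - i
decreasing_by
  all_goals try simp [List.length_eraseIdx, h]
  all_goals omega

def get_filtered_break_points (break_points : List Int) : List Int :=
  getFBPLoopA break_points 0 0

-- ===== PORT B =====
def get_filtered_break_points_alt (break_points : List Int) : List Int :=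
  (break_points.foldl
    (fun (s : List Int × Int) bp =>
      if 9 ≤ bp - s.2 ∧ bp - s.2 ≤ 19 then (s.1 ++ [bp], bp) else s)
    ([], 0)).1

-- ===== PRECONDITION & SPEC =====
def Spec_get_filtered_break_points (break_points : List Int) (out : List Int) : Prop := out = get_filtered_break_points_alt break_points
instance (break_points : List Int) (out : List Int) : Decidable (Spec_get_filtered_break_points break_points out) := by unfold Spec_get_filtered_break_points; infer_instance

-- ===== CLAIM (what is proved, stated in full; the proofs are below) =====
def Claim_equal_get_filtered_break_points : Prop := ∀ (break_points : List Int), Dom_get_filtered_break_points break_points → Spec_get_filtered_break_points break_points (get_filtered_break_points break_points)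

-- ===== LEMMAS AND PROOFS =====

-- reference filter: the common value of both loops
def getFBPRef : List Int → Int → List Int
  | [], _ => []
  | x :: xs, ps =>
      if 9 ≤ x - ps ∧ x - ps ≤ 19 then x :: getFBPRef xs x else getFBPRef xs ps

theorem foldB_eq (xs : List Int) (acc : List Int) (ps : Int) :
    xs.foldl
      (fun (s : List Int × Int) bp =>
        if 9 ≤ bp - s.2 ∧ bp - s.2 ≤ 19 then (s.1 ++ [bp], bp) else s)
      (acc, ps)
    = (acc ++ getFBPRef xs ps,
       (xs.foldl
        (fun (s : List Int × Int) bp =>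
          if 9 ≤ bp - s.2 ∧ bp - s.2 ≤ 19 then (s.1 ++ [bp], bp) else s)
        (acc, ps)).2) := by
  induction xs generalizing acc ps with
  | nil => simp [getFBPRef]
  | cons x xs ih =>
      simp only [List.foldl, getFBPRef]
      split_ifs with h
      · rw [ih]; simp
      · rw [ih]

theorem loopA_eq (fbp : List Int) (i : Nat) (ps : Int) :
    getFBPLoopA fbp i ps = fbp.take i ++ getFBPRef (fbp.drop i) ps := by
  rw [getFBPLoopA]
  split_ifs with h hc
  · have hdrop : fbp.drop i = fbp[i] :: fbp.drop (i + 1) := List.drop_eq_getElem_cons h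
    rw [loopA_eq fbp (i + 1) fbp[i]]
    rw [hdrop, getFBPRef, if_pos hc, List.take_add_one, List.getElem?_eq_getElem h]
    simp only [Option.toList_some, List.append_assoc, List.singleton_append]
  · have hdrop : fbp.drop i = fbp[i] :: fbp.drop (i + 1) := List.drop_eq_getElem_cons h
    rw [loopA_eq (fbp.eraseIdx i) i ps]
    rw [List.eraseIdx_eq_take_drop_succ]
    have hle : i ≤ fbp.length := Nat.le_of_lt h
    rw [List.take_append_of_le_length (by simp [hle]), List.take_take, Nat.min_self]
    rw [List.drop_append_of_le_length (by simp [hle])]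
    rw [List.drop_take]
    simp only [Nat.sub_self, List.take_zero, List.nil_append, hdrop, getFBPRef]
    rw [if_neg hc]
  · rw [List.drop_eq_nil_of_le (by omega), List.take_of_length_le (by omega)]
    simp [getFBPRef]
termination_by fbp.length - i
decreasing_by
  all_goals try simp [List.length_eraseIdx, h]
  all_goals omega

-- ===== VERDICT (by name: the statement is the Claim_ definition above) =====
theorem get_filtered_break_points_spec : Claim_equal_get_filtered_break_points := by
  intro bps _
  unfold Spec_get_filtered_break_points get_filtered_break_points get_filtered_break_points_alt
  rw [loopA_eq, foldB_eq]
  simp
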